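-- pv_equiv track=rewrite | github.com/dinosawrusrex/adventofcode2k21 | day10.py | filter_illegal
-- ===== SOURCE A (Python) =====
-- BRACKETS = {'<': '>', '(': ')', '[': ']', '{': '}'}
--
-- ILLEGAL_POINTS = {')': 3, ']': 57, '}': 1197, '>': 25137}
--
-- def trim_line(line):
--     for item in BRACKETS.items():
--         if (pair := ''.join(item)) in line:
--             line = trim_line(line.replace(pair, ''))
--     return line
--
-- def first_illegal_match(line):
--     line = trim_line(line)
--     illegals = [b for b in BRACKETS.values() if b in line]
--     if illegals:
--         return line, ILLEGAL_POINTS[min(illegals, key=lambda b: line.find(b))]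
--     return line, 0
--
-- def filter_illegal(lines):
--     incomplete, illegal = [], 0
--     for l in lines:
--         line, score = first_illegal_match(l.strip())
--         if score:
--             illegal += score
--         else:
--             incomplete.append(line)
--     return incomplete, illegal
-- ===== SOURCE B (Python) =====
-- OPEN = {'<': '>', '(': ')', '[': ']', '{': '}'}
-- POINTS = {')': 3, ']': 57, '}': 1197, '>': 25137}
--
-- def filter_illegal(lines):
--     incomplete, illegal = [], 0
--     for l in lines:
--         stack = []
--         for c in l.strip():
--             if stack and OPEN.get(stack[-1]) == c:
--                 stack.pop()
--             else:
--                 stack.append(c)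
--         score = next((POINTS[c] for c in stack if c in POINTS), 0)
--         if score:
--             illegal += score
--         else:
--             incomplete.append(''.join(stack))
--     return incomplete, illegal
-- ===== Notes on version B (the rewrite author's own statement) =====
-- stated objective: alternative
-- what changed: Replaces the recursive repeated string-replace pair-cancellation plus min-by-find closer scan with a single left-to-right stack pass per line; the leftover stack is the reduced line and its first scoreable closer gives the illegal score.
import Mathlib
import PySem

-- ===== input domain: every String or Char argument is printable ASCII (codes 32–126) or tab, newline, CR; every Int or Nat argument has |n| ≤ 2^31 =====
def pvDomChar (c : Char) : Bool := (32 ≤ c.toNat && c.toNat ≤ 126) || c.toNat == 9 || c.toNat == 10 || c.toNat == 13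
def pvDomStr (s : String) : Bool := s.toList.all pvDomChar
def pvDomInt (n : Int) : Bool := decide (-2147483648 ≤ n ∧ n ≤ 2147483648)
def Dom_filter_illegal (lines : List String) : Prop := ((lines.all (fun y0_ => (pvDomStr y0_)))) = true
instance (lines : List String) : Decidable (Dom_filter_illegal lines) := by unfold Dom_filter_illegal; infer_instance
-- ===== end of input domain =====

-- B replaces A's recursive repeated string-replace pair-cancellation by a single
-- left-to-right stack pass per line computing the same reduced line and score.

-- ===== PORT A =====
def pvBracketsA : PySem.Dict Char Char := ⟨[('<', '>'), ('(', ')'), ('[', ']'), ('{', '}')]⟩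
def pvPointsA : PySem.Dict Char Int := ⟨[(')', 3), (']', 57), ('}', 1197), ('>', 25137)]⟩

-- trim_line: the recursion over BRACKETS.items(); the Nat argument is a fuel guard making the
-- recursion total (fuel = length of the line is always sufficient: each replace of a present
-- pair removes at least two characters; the 0-fuel case is never reached from pvTrimLine).
def pvTrimGo : Nat → List (Char × Char) → List Char → List Char
  | _, [], l => l
  | 0, _ :: _, l => l
  | f + 1, (o, c) :: rest, l =>
    if PySem.Chars.isIn [o, c] l then
      pvTrimGo f rest (pvTrimGo f pvBracketsA.items (PySem.Chars.replace l [o, c] []))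
    else
      pvTrimGo (f + 1) rest l
termination_by fuel rest _ => (fuel, rest.length)

def pvTrimLine (l : List Char) : List Char := pvTrimGo l.length pvBracketsA.items l

-- first_illegal_match; min(...) is guarded by 'if illegals', so minD's default is unreachable,
-- and ILLEGAL_POINTS[...] is looked up at a key that is always present, ported as getD.
def pvFirstIllegalMatch (l : List Char) : List Char × Int :=
  let line := pvTrimLine l
  let illegals := pvBracketsA.values.filter (fun b => PySem.Chars.isIn [b] line)
  if illegals = [] then (line, 0)
  else (line, pvPointsA.getD (PySem.List.minD illegals (fun b => PySem.Chars.find line [b]) ' ') 0)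

def filter_illegal (lines : List String) : List String × Int :=
  lines.foldl
    (fun acc l =>
      let r := pvFirstIllegalMatch (PySem.Chars.strip l.toList)
      if r.2 ≠ 0 then (acc.1, acc.2 + r.2) else (acc.1 ++ [String.ofList r.1], acc.2))
    ([], 0)

-- ===== PORT B =====
def pvOpenB : PySem.Dict Char Char := ⟨[('<', '>'), ('(', ')'), ('[', ']'), ('{', '}')]⟩
def pvPointsB : PySem.Dict Char Int := ⟨[(')', 3), (']', 57), ('}', 1197), ('>', 25137)]⟩

-- the stack is held top-first (Lean list head = Python stack[-1]); ''.join(stack) = reverse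
def pvStep (st : List Char) (c : Char) : List Char :=
  match st with
  | t :: st' => if pvOpenB.get? t == some c then st' else c :: t :: st'
  | [] => [c]

def filter_illegal_alt (lines : List String) : List String × Int :=
  lines.foldl
    (fun acc l =>
      let stack := (PySem.Chars.strip l.toList).foldl pvStep []
      let score : Int :=
        match stack.reverse.find? (fun c => pvPointsB.contains c) with
        | some c => pvPointsB.getD c 0
        | none => 0
      if score ≠ 0 then (acc.1, acc.2 + score) else (acc.1 ++ [String.ofList stack.reverse], acc.2))
    ([], 0)

-- ===== PRECONDITION & SPEC =====
def Spec_filter_illegal (lines : List String) (out : List String × Int) : Prop := out = filter_illegal_alt lines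
instance (lines : List String) (out : List String × Int) : Decidable (Spec_filter_illegal lines out) := by unfold Spec_filter_illegal; infer_instance

-- ===== CLAIM (what is proved, stated in full; the proofs are below) =====
def Claim_equal_filter_illegal : Prop := ∀ (lines : List String), Dom_filter_illegal lines → Spec_filter_illegal lines (filter_illegal lines)

-- ===== LEMMAS AND PROOFS =====

-- the stack machine: pvRun st l = the stack after feeding l (top first)
def pvRun (st l : List Char) : List Char := l.foldl pvStep st

theorem pvPoints_eq : pvPointsA = pvPointsB := rfl

theorem pv_get?_mem {t c : Char} (h : pvOpenB.get? t = some c) :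
    (t, c) ∈ pvBracketsA.items := by
  unfold pvOpenB PySem.Dict.get? at h
  cases hf : List.find? (fun p => p.1 == t) ([('<', '>'), ('(', ')'), ('[', ']'), ('{', '}')] : List (Char × Char)) with
  | none => rw [hf] at h; simp at h
  | some pr =>
    rw [hf] at h
    have hm := List.mem_of_find?_eq_some hf
    have hp := List.find?_some hf
    obtain ⟨p1, p2⟩ := pr
    simp at hp h
    subst hp; subst h
    exact hm

theorem pv_get?_ne_opener {t o c : Char} (h : (o, c) ∈ pvBracketsA.items) :
    pvOpenB.get? t ≠ some o := by
  intro hc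
  have h2 := pv_get?_mem hc
  have h' : (o, c) ∈ ([('<', '>'), ('(', ')'), ('[', ']'), ('{', '}')] : List (Char × Char)) := h
  have h2' : (t, o) ∈ ([('<', '>'), ('(', ')'), ('[', ']'), ('{', '}')] : List (Char × Char)) := h2
  simp at h' h2'
  rcases h' with ⟨rfl, rfl⟩ | ⟨rfl, rfl⟩ | ⟨rfl, rfl⟩ | ⟨rfl, rfl⟩ <;> simp_all

theorem pv_get?_pair {o c : Char} (h : (o, c) ∈ pvBracketsA.items) :
    pvOpenB.get? o = some c := by
  have h' : (o, c) ∈ ([('<', '>'), ('(', ')'), ('[', ']'), ('{', '}')] : List (Char × Char)) := h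
  fin_cases h' <;> decide

theorem pvStep_pair {o c : Char} (h : (o, c) ∈ pvBracketsA.items) (st : List Char) :
    pvStep (pvStep st o) c = st := by
  cases st with
  | nil => simp [pvStep, pv_get?_pair h]
  | cons t st' =>
    have hne : (pvOpenB.get? t == some o) = false := by
      simp only [beq_eq_false_iff_ne, ne_eq]
      exact pv_get?_ne_opener h
    simp [pvStep, hne, pv_get?_pair h]

theorem pvRun_append (st u v : List Char) : pvRun st (u ++ v) = pvRun (pvRun st u) v := by
  simp [pvRun, List.foldl_append]

theorem pvRun_del {o c : Char} (h : (o, c) ∈ pvBracketsA.items) (st u v : List Char) :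
    pvRun st (u ++ o :: c :: v) = pvRun st (u ++ v) := by
  rw [pvRun_append, pvRun_append st u v]
  show pvRun (pvStep (pvStep (pvRun st u) o) c) v = _
  rw [pvStep_pair h]

theorem pvRep_go_run {o c : Char} (h : (o, c) ∈ pvBracketsA.items) :
    ∀ (fuel : Nat) (l acc st : List Char), l.length ≤ fuel →
      pvRun st (PySem.Chars.replace.go [o, c] [] fuel l acc) = pvRun st (acc.reverse ++ l) := by
  intro fuel
  induction fuel with
  | zero =>
    intro l acc st hl
    cases l with
    | nil => simp [PySem.Chars.replace.go]
    | cons x t => simp at hl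
  | succ f ih =>
    intro l acc st hl
    cases l with
    | nil => simp [PySem.Chars.replace.go]
    | cons x t =>
      by_cases hp : [o, c] <+: (x :: t)
      · obtain ⟨s, hs⟩ := hp
        have hs' : o :: c :: s = x :: t := hs
        cases hs'
        have hb : List.isPrefixOf [o, c] (o :: c :: s) = true := by
          rw [List.isPrefixOf_iff_prefix]; exact ⟨s, rfl⟩
        rw [PySem.Chars.replace.go, if_pos hb]
        simp only [List.length_cons, List.drop_succ_cons, List.drop_zero, List.reverse_nil,
          List.nil_append, List.length_nil]
        rw [ih s acc st (by simp at hl; omega)]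
        have := pvRun_del h st acc.reverse s
        simpa using this.symm
      · have hb : List.isPrefixOf [o, c] (x :: t) = false := by
          rw [Bool.eq_false_iff, ne_eq, List.isPrefixOf_iff_prefix]; exact hp
        rw [PySem.Chars.replace.go, if_neg (by simp [hb])]
        rw [ih t (x :: acc) st (by simp at hl; omega)]
        have heq : (x :: acc).reverse ++ t = acc.reverse ++ x :: t := by simp
        rw [heq]

theorem pvRep_run {o c : Char} (h : (o, c) ∈ pvBracketsA.items) (l st : List Char) :
    pvRun st (PySem.Chars.replace l [o, c] []) = pvRun st l := by
  have : PySem.Chars.replace l [o, c] [] = PySem.Chars.replace.go [o, c] [] l.length l [] := by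
    simp [PySem.Chars.replace]
  rw [this, pvRep_go_run h l.length l [] st le_rfl]
  simp

theorem pvRep_go_len (o c : Char) :
    ∀ (fuel : Nat) (l acc : List Char), l.length ≤ fuel →
      (PySem.Chars.replace.go [o, c] [] fuel l acc).length ≤ acc.length + l.length := by
  intro fuel
  induction fuel with
  | zero =>
    intro l acc hl
    cases l with
    | nil => simp [PySem.Chars.replace.go]
    | cons x t => simp at hl
  | succ f ih =>
    intro l acc hl
    cases l with
    | nil => simp [PySem.Chars.replace.go]
    | cons x t =>
      by_cases hb : List.isPrefixOf [o, c] (x :: t) = true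
      · rw [PySem.Chars.replace.go, if_pos hb]
        rw [List.isPrefixOf_iff_prefix] at hb
        obtain ⟨s, hs⟩ := hb
        have hs' : o :: c :: s = x :: t := hs
        cases hs'
        simp only [List.length_cons, List.drop_succ_cons, List.reverse_nil,
          List.nil_append]
        have := ih s acc (by simp at hl; omega)
        simp at this ⊢
        omega
      · rw [PySem.Chars.replace.go, if_neg (by simp at hb ⊢; exact hb)]
        have := ih t (x :: acc) (by simp at hl; omega)
        simp at this ⊢
        omega

theorem pvRep_go_len2 (o c : Char) :
    ∀ (fuel : Nat) (l acc : List Char), l.length ≤ fuel → [o, c] <:+: l →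
      (PySem.Chars.replace.go [o, c] [] fuel l acc).length + 2 ≤ acc.length + l.length := by
  intro fuel
  induction fuel with
  | zero =>
    intro l acc hl hinf
    have := hinf.length_le
    cases l with
    | nil => simp at this
    | cons x t => simp at hl
  | succ f ih =>
    intro l acc hl hinf
    cases l with
    | nil => have := hinf.length_le; simp at this
    | cons x t =>
      by_cases hb : List.isPrefixOf [o, c] (x :: t) = true
      · rw [PySem.Chars.replace.go, if_pos hb]
        rw [List.isPrefixOf_iff_prefix] at hb
        obtain ⟨s, hs⟩ := hb
        have hs' : o :: c :: s = x :: t := hs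
        cases hs'
        simp only [List.length_cons, List.drop_succ_cons, List.reverse_nil,
          List.nil_append]
        have := pvRep_go_len o c f s acc (by simp at hl; omega)
        simp at this ⊢
        omega
      · rw [PySem.Chars.replace.go, if_neg (by simp at hb ⊢; exact hb)]
        have hinf' : [o, c] <:+: t := by
          rcases List.infix_cons_iff.mp hinf with h1 | h1
          · exact absurd ((List.isPrefixOf_iff_prefix).mpr h1) (by simpa using hb)
          · exact h1
        have := ih t (x :: acc) (by simp at hl; omega) hinf'
        simp at this ⊢
        omega

theorem pvRep_len (o c : Char) (l : List Char) :
    (PySem.Chars.replace l [o, c] []).length ≤ l.length := by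
  have : PySem.Chars.replace l [o, c] [] = PySem.Chars.replace.go [o, c] [] l.length l [] := by
    simp [PySem.Chars.replace]
  rw [this]
  have := pvRep_go_len o c l.length l [] le_rfl
  simpa using this

theorem pvRep_len2 {o c : Char} {l : List Char} (h : PySem.Chars.isIn [o, c] l = true) :
    (PySem.Chars.replace l [o, c] []).length + 2 ≤ l.length := by
  have he : PySem.Chars.replace l [o, c] [] = PySem.Chars.replace.go [o, c] [] l.length l [] := by
    simp [PySem.Chars.replace]
  rw [he]
  have hinf := (PySem.Chars.isIn_iff_infix _ _).mp h
  have := pvRep_go_len2 o c l.length l [] le_rfl hinf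
  simpa using this

theorem pvTrimGo_len : ∀ (fuel : Nat) (rest : List (Char × Char)) (l : List Char),
    (pvTrimGo fuel rest l).length ≤ l.length := by
  intro fuel
  induction fuel with
  | zero => intro rest l; cases rest with
    | nil => simp [pvTrimGo]
    | cons p rest' => simp [pvTrimGo]
  | succ f ih =>
    intro rest
    induction rest with
    | nil => intro l; simp [pvTrimGo]
    | cons p rest' ihr =>
      intro l
      obtain ⟨o, c⟩ := p
      by_cases hin : PySem.Chars.isIn [o, c] l = true
      · rw [pvTrimGo, if_pos hin]
        calc (pvTrimGo f rest' (pvTrimGo f pvBracketsA.items (PySem.Chars.replace l [o, c] []))).length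
            ≤ (pvTrimGo f pvBracketsA.items (PySem.Chars.replace l [o, c] [])).length := ih _ _
          _ ≤ (PySem.Chars.replace l [o, c] []).length := ih _ _
          _ ≤ l.length := pvRep_len o c l
      · rw [pvTrimGo, if_neg (by simpa using hin)]
        exact ihr l

theorem pvTrimGo_run : ∀ (fuel : Nat) (rest : List (Char × Char)),
    (∀ p ∈ rest, p ∈ pvBracketsA.items) → ∀ (l st : List Char),
    pvRun st (pvTrimGo fuel rest l) = pvRun st l := by
  intro fuel
  induction fuel with
  | zero => intro rest h l st; cases rest with
    | nil => simp [pvTrimGo]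
    | cons p rest' => simp [pvTrimGo]
  | succ f ih =>
    intro rest
    induction rest with
    | nil => intro h l st; simp [pvTrimGo]
    | cons p rest' ihr =>
      intro h l st
      obtain ⟨o, c⟩ := p
      have hoc : (o, c) ∈ pvBracketsA.items := h _ List.mem_cons_self
      by_cases hin : PySem.Chars.isIn [o, c] l = true
      · rw [pvTrimGo, if_pos hin]
        rw [ih rest' (fun q hq => h q (List.mem_cons_of_mem _ hq)) _ st,
            ih pvBracketsA.items (fun q hq => hq) _ st,
            pvRep_run hoc]
      · rw [pvTrimGo, if_neg (by simpa using hin)]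
        exact ihr (fun q hq => h q (List.mem_cons_of_mem _ hq)) l st

theorem pv_isIn_nil (a b : Char) : PySem.Chars.isIn [a, b] [] = false := by
  rw [PySem.Chars.isIn_eq_false_iff]
  intro hinf
  simpa using hinf.length_le

theorem pvTrimGo_nf : ∀ (fuel : Nat) (rest : List (Char × Char)) (l : List Char),
    l.length ≤ 2 * fuel →
    (∀ p ∈ pvBracketsA.items, p ∉ rest → PySem.Chars.isIn [p.1, p.2] l = false) →
    ∀ p ∈ pvBracketsA.items, PySem.Chars.isIn [p.1, p.2] (pvTrimGo fuel rest l) = false := by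
  intro fuel
  induction fuel with
  | zero =>
    intro rest l hl hout p hp
    have hl0 : l = [] := by cases l with
      | nil => rfl
      | cons x t => simp at hl
    subst hl0
    cases rest with
    | nil => rw [pvTrimGo]; exact pv_isIn_nil p.1 p.2
    | cons q rest' => rw [pvTrimGo]; exact pv_isIn_nil p.1 p.2
  | succ f ih =>
    intro rest
    induction rest with
    | nil =>
      intro l hl hout p hp
      rw [pvTrimGo]
      exact hout p hp (List.not_mem_nil)
    | cons q rest' ihr =>
      intro l hl hout p hp
      obtain ⟨o, c⟩ := q
      by_cases hin : PySem.Chars.isIn [o, c] l = true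
      · rw [pvTrimGo, if_pos hin]
        have hlen2 : 2 ≤ l.length := by
          have hinf := (PySem.Chars.isIn_iff_infix _ _).mp hin
          simpa using hinf.length_le
        have hr0 : (PySem.Chars.replace l [o, c] []).length ≤ 2 * f := by
          have := pvRep_len2 hin; omega
        have hnfr := ih pvBracketsA.items (PySem.Chars.replace l [o, c] []) hr0
          (fun q hq hnq => absurd hq hnq)
        have hlen3 : (pvTrimGo f pvBracketsA.items (PySem.Chars.replace l [o, c] [])).length ≤ 2 * f :=
          le_trans (pvTrimGo_len f _ _) hr0
        exact ih rest' _ hlen3 (fun q hq _ => hnfr q hq) p hp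
      · rw [pvTrimGo, if_neg (by simpa using hin)]
        refine ihr l hl ?_ p hp
        intro q hq hnq
        by_cases hq2 : q = (o, c)
        · subst hq2; simpa using hin
        · exact hout q hq (by simp [List.mem_cons, hq2, hnq])

theorem pvRun_noredex : ∀ (l st : List Char),
    (∀ p ∈ pvBracketsA.items, PySem.Chars.isIn [p.1, p.2] (st.reverse ++ l) = false) →
    pvRun st l = l.reverse ++ st := by
  intro l
  induction l with
  | nil => intro st h; simp [pvRun]
  | cons c cs ih =>
    intro st h
    cases st with
    | nil =>
      show pvRun (pvStep [] c) cs = _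
      rw [show pvStep [] c = [c] from rfl]
      rw [ih [c] (by intro p hp; simpa using h p hp)]
      simp
    | cons t st' =>
      by_cases hb : pvOpenB.get? t = some c
      · exfalso
        have hmem := pv_get?_mem hb
        have hinf : [t, c] <:+: ((t :: st').reverse ++ c :: cs) := by
          refine ⟨st'.reverse, cs, ?_⟩
          simp
        have h2 := h (t, c) hmem
        rw [PySem.Chars.isIn_eq_false_iff] at h2
        exact h2 hinf
      · have hbe : (pvOpenB.get? t == some c) = false := by simp [hb]
        show pvRun (pvStep (t :: st') c) cs = _
        rw [show pvStep (t :: st') c = c :: t :: st' from by simp [pvStep, hbe]]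
        rw [ih (c :: t :: st') ?_]
        · simp
        · intro p hp
          have h2 := h p hp
          have heq : (c :: t :: st').reverse ++ cs = (t :: st').reverse ++ c :: cs := by simp
          rw [heq]
          exact h2

theorem pvTrim_eq (l : List Char) : pvTrimLine l = (l.foldl pvStep []).reverse := by
  have hnf := pvTrimGo_nf l.length pvBracketsA.items l (by omega) (fun p hp hnp => absurd hp hnp)
  have h1 := pvRun_noredex (pvTrimLine l) [] (by intro p hp; simpa using hnf p hp)
  have h2 := pvTrimGo_run l.length pvBracketsA.items (fun q hq => hq) l []
  have h3 : (pvTrimLine l).reverse = l.foldl pvStep [] := by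
    have : pvRun [] (pvTrimLine l) = pvRun [] l := h2
    rw [h1] at this
    simpa [pvRun] using this
  rw [← h3, List.reverse_reverse]

-- find of a single character
theorem pvFindGo_cons (sub : List Char) (x : Char) (t : List Char) (k : Nat) :
    PySem.Chars.find.go sub (x :: t) k =
      if sub.isPrefixOf (x :: t) then (k : Int) else PySem.Chars.find.go sub t (k + 1) := by
  rw [PySem.Chars.find.go.eq_def]

theorem pvFindGo_here (b : Char) : ∀ (u : List Char) (v : List Char) (k : Nat), b ∉ u →
    PySem.Chars.find.go [b] (u ++ b :: v) k = (k : Int) + u.length := by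
  intro u
  induction u with
  | nil =>
    intro v k _
    rw [List.nil_append, pvFindGo_cons, if_pos (by simp [List.isPrefixOf])]
    simp
  | cons x u' ih =>
    intro v k hbu
    have hbx : (b == x) = false := by
      simp only [beq_eq_false_iff_ne, ne_eq]
      intro e; exact hbu (e ▸ List.mem_cons_self)
    rw [List.cons_append, pvFindGo_cons, if_neg (by simp [List.isPrefixOf, hbx])]
    rw [ih v (k + 1) (fun hm => hbu (List.mem_cons_of_mem _ hm))]
    simp
    omega

theorem pvFindGo_skip (b x : Char) (hbx : b ≠ x) : ∀ (u v : List Char) (k : Nat), b ∉ u →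
    PySem.Chars.find.go [b] (u ++ x :: v) k = PySem.Chars.find.go [b] v (k + u.length + 1) := by
  intro u
  induction u with
  | nil =>
    intro v k _
    have hbx2 : (b == x) = false := by simp [hbx]
    rw [List.nil_append, pvFindGo_cons, if_neg (by simp [List.isPrefixOf, hbx2])]
    simp
  | cons y u' ih =>
    intro v k hbu
    have hby : (b == y) = false := by
      simp only [beq_eq_false_iff_ne, ne_eq]
      intro e; exact hbu (e ▸ List.mem_cons_self)
    rw [List.cons_append, pvFindGo_cons, if_neg (by simp [List.isPrefixOf, hby])]
    rw [ih v (k + 1) (fun hm => hbu (List.mem_cons_of_mem _ hm))]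
    congr 1
    simp only [List.length_cons]
    omega

theorem pvFindGo_ge (b : Char) : ∀ (v : List Char) (k : Nat), b ∈ v →
    (k : Int) ≤ PySem.Chars.find.go [b] v k := by
  intro v
  induction v with
  | nil => intro k h; simp at h
  | cons x v' ih =>
    intro k h
    by_cases e : b = x
    · subst e
      rw [pvFindGo_cons, if_pos (by simp [List.isPrefixOf])]
    · have hbv : b ∈ v' := by
        rcases List.mem_cons.mp h with h1 | h1
        · exact absurd h1 e
        · exact h1
      have hbx : (b == x) = false := by simp [e]
      rw [pvFindGo_cons, if_neg (by simp [List.isPrefixOf, hbx])]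
      refine le_trans ?_ (ih (k + 1) hbv)
      push_cast
      omega

theorem pv_contains_values {c : Char} (h : pvPointsB.contains c = true) :
    c ∈ pvBracketsA.values := by
  simp [pvPointsB, PySem.Dict.contains] at h
  rcases h with h | h | h | h <;> (subst h; decide)

theorem pv_values_contains {c : Char} (h : c ∈ pvBracketsA.values) :
    pvPointsB.contains c = true := by
  have h' : c ∈ (['>', ')', ']', '}'] : List Char) := h
  fin_cases h' <;> decide

theorem pvScore_eq (R : List Char) :
    (if (pvBracketsA.values.filter (fun b => PySem.Chars.isIn [b] R)) = [] then (0 : Int)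
     else pvPointsA.getD
       (PySem.List.minD (pvBracketsA.values.filter (fun b => PySem.Chars.isIn [b] R))
         (fun b => PySem.Chars.find R [b]) ' ') 0)
    = (match R.find? (fun c => pvPointsB.contains c) with
       | some c => pvPointsB.getD c 0
       | none => (0 : Int)) := by
  cases hf : R.find? (fun c => pvPointsB.contains c) with
  | none =>
    rw [List.find?_eq_none] at hf
    have hnil : pvBracketsA.values.filter (fun b => PySem.Chars.isIn [b] R) = [] := by
      rw [List.filter_eq_nil_iff]
      intro b hb hIn
      have hbR : b ∈ R := (List.singleton_infix_iff _ _).mp ((PySem.Chars.isIn_iff_infix _ _).mp hIn)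
      exact hf b hbR (pv_values_contains hb)
    simp [hnil]
  | some c0 =>
    rw [List.find?_eq_some_iff_append] at hf
    obtain ⟨hp0, u, v, rfl, hu⟩ := hf
    have hc0v : c0 ∈ pvBracketsA.values := pv_contains_values hp0
    have hc0R : c0 ∈ u ++ c0 :: v := by simp
    have hc0in : PySem.Chars.isIn [c0] (u ++ c0 :: v) = true := by
      rw [PySem.Chars.isIn_iff_infix]
      exact (List.singleton_infix_iff _ _).mpr hc0R
    have hc0il : c0 ∈ (pvBracketsA.values.filter (fun b => PySem.Chars.isIn [b] (u ++ c0 :: v))) :=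
      List.mem_filter.mpr ⟨hc0v, hc0in⟩
    have hne : pvBracketsA.values.filter (fun b => PySem.Chars.isIn [b] (u ++ c0 :: v)) ≠ [] :=
      List.ne_nil_of_mem hc0il
    rw [if_neg hne]
    have hc0u : c0 ∉ u := fun hm => by simpa [hp0] using hu c0 hm
    have hkey0 : PySem.Chars.find (u ++ c0 :: v) [c0] = (u.length : Int) := by
      show PySem.Chars.find.go [c0] (u ++ c0 :: v) 0 = _
      rw [pvFindGo_here c0 u v 0 hc0u]
      simp
    have hkeygt : ∀ b ∈ pvBracketsA.values.filter (fun b => PySem.Chars.isIn [b] (u ++ c0 :: v)),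
        b ≠ c0 → (u.length : Int) < PySem.Chars.find (u ++ c0 :: v) [b] := by
      intro b hb hbne
      obtain ⟨hbv, hbin⟩ := List.mem_filter.mp hb
      have hbc := pv_values_contains hbv
      have hbR : b ∈ u ++ c0 :: v :=
        (List.singleton_infix_iff _ _).mp ((PySem.Chars.isIn_iff_infix _ _).mp hbin)
      have hbu : b ∉ u := fun hm => by simpa [hbc] using hu b hm
      have hbv2 : b ∈ v := by
        rcases List.mem_append.mp hbR with h1 | h1
        · exact absurd h1 hbu
        · rcases List.mem_cons.mp h1 with h2 | h2
          · exact absurd h2 hbne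
          · exact h2
      show (u.length : Int) < PySem.Chars.find.go [b] (u ++ c0 :: v) 0
      rw [pvFindGo_skip b c0 hbne u v 0 hbu]
      have := pvFindGo_ge b v (0 + u.length + 1) hbv2
      push_cast at this ⊢
      omega
    cases hm : PySem.List.min?
        (pvBracketsA.values.filter (fun b => PySem.Chars.isIn [b] (u ++ c0 :: v)))
        (fun b => PySem.Chars.find (u ++ c0 :: v) [b]) with
    | none =>
      rw [PySem.List.min?_eq_none_iff] at hm
      exact absurd hm hne
    | some m =>
      have hmm := PySem.List.min?_mem hm
      have hmin := PySem.List.min?_isMin hm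
      have hmc : m = c0 := by
        by_contra hne2
        have h1 := hmin c0 hc0il
        have h2 := hkeygt m hmm hne2
        rw [hkey0] at h1
        omega
      subst hmc
      simp [PySem.List.minD, hm, pvPoints_eq]

theorem pvLine_eq (l : List Char) :
    pvFirstIllegalMatch l =
      ((l.foldl pvStep []).reverse,
       match (l.foldl pvStep []).reverse.find? (fun c => pvPointsB.contains c) with
       | some c => pvPointsB.getD c 0
       | none => (0 : Int)) := by
  rw [← pvScore_eq]
  simp only [pvFirstIllegalMatch, pvTrim_eq]
  split <;> simp_all

-- ===== VERDICT (by name: the statement is the Claim_ definition above) =====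
theorem filter_illegal_spec : Claim_equal_filter_illegal := by
  intro lines _
  unfold Spec_filter_illegal filter_illegal filter_illegal_alt
  apply List.foldl_ext
  intro acc s _
  rw [pvLine_eq]
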